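-- pv_equiv track=rewrite | github.com/DA-testa/tree-height-from-empty-VjaceslavsMelnicenko221RDB527 | tree_height.py | compute_height
-- ===== SOURCE A (Python) =====
-- def compute_height(n, parents):
--     q = n*[-1]
--
--     def h(node):
--         if q[node] != -1:
--             return q[node]
--         if parents[node] == -1:
--              q[node] = 1
--         else:
--              q[node] = h(parents[node])+1
--         return  q[node]
--
--     max_height = 0
--     for root in range(n):
--         max_height = max(max_height,h(root))
--
--     return max_height
-- ===== SOURCE B (Python) =====
-- def compute_height(n, parents):
--     best = 0
--     for start in range(n):
--         depth = 0
--         node = start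
--         while node != -1:
--             depth += 1
--             node = parents[node]
--         if depth > best:
--             best = depth
--     return best
-- ===== Notes on version B (the rewrite author's own statement) =====
-- stated objective: simpler
-- what changed: Replaces A's memoized recursive helper mutating a shared memo array with a plain iterative walk up the parent chain from each node, keeping a running maximum.
-- outside the precondition, e.g. on compute_height(3, [-1, -3, 0]): A returns 2, B returns 2; on compute_height(2, [1, 0]): A raises RecursionError, B does not finish within the time limit
import Mathlib
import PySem

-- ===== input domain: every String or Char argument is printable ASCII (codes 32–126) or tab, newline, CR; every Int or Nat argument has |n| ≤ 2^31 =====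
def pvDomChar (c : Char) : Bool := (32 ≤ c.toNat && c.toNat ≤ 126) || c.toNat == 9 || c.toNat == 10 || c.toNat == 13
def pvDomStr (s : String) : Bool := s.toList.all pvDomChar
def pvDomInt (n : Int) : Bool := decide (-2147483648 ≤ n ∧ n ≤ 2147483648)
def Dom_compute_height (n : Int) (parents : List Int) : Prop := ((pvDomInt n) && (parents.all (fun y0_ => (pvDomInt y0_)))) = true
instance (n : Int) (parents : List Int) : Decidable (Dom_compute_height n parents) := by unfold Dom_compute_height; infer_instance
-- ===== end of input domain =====

-- B replaces A's memoized recursion (shared memo array) with a plain per-node iterative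
-- parent-chain walk; same results on the stated forest domain, simpler, not faster.

-- ===== PORT A =====
-- inner helper h of A: memoized recursion mutating q; fuel bounds Python's recursion depth
-- (none = the Python raises: IndexError from an out-of-range index, RecursionError when fuel runs out)
def pvH (parents : List Int) : Nat → Int → List Int → Option (Int × List Int)
  | 0, _, _ => none
  | fuel+1, node, q =>
    match PySem.List.pyGet? q node with
    | none => none
    | some v =>
      if v ≠ -1 then some (v, q)
      else
        match PySem.List.pyGet? parents node with
        | none => none
        | some p =>
          if p = -1 then
            match PySem.List.pySet? q node 1 with
            | none => none
            | some q' =>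
              match PySem.List.pyGet? q' node with
              | none => none
              | some r => some (r, q')
          else
            match pvH parents fuel p q with
            | none => none
            | some (hv, q1) =>
              match PySem.List.pySet? q1 node (hv + 1) with
              | none => none
              | some q' =>
                match PySem.List.pyGet? q' node with
                | none => none
                | some r => some (r, q')

def compute_height (n : Int) (parents : List Int) : Int :=
  -- q = n*[-1]  (empty for n ≤ 0, exactly as in Python)
  let q0 : List Int := List.replicate n.toNat (-1)
  let res := (PySem.List.pyRange 0 n 1).foldl
    (fun st root =>
      match st with
      | none => none
      | some (mh, q) =>
        match pvH parents (q.length + 1) root q with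
        | none => none
        | some (v, q') => some (max mh v, q'))
    (some ((0 : Int), q0))
  match res with
  | some (mh, _) => mh
  | none => 0

-- ===== PORT B =====
-- the 'while node != -1' loop of B; fuel = len(parents)+1 suffices on the acyclic domain
-- (none = the Python loop raises IndexError or never terminates, both outside Pre_)
def pvChase (parents : List Int) : Nat → Int → Int → Option Int
  | 0, _, _ => none
  | fuel+1, node, depth =>
    if node = -1 then some depth
    else
      match PySem.List.pyGet? parents node with
      | none => none
      | some p => pvChase parents fuel p (depth + 1)

def compute_height_alt (n : Int) (parents : List Int) : Int :=
  (PySem.List.pyRange 0 n 1).foldl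
    (fun best start =>
      match pvChase parents (parents.length + 1) start 0 with
      | none => best
      | some d => if best < d then d else best)
    0

-- ===== PRECONDITION & SPEC =====
-- iterParent parents k j: the node reached after following parent pointers (at most) k times from j
def iterParent (parents : List Int) : Nat → Int → Int
  | 0, j => j
  | k+1, j => if j = -1 then -1 else iterParent parents k ((PySem.List.pyGet? parents j).getD (-1))

-- Pre_ restricts to the function's natural domain: a forest over nodes 0..n-1 given as a parent
-- array of length ≥ n whose first n entries are -1 or a node index < n and whose parent chains all
-- reach -1 (acyclic).  Outside it A raises (IndexError for a short array or an entry ≥ n,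
-- RecursionError on a cycle) or, for entries ≤ -2, returns via Python's accidental negative-index
-- wraparound (which B happens to share in Python but which is an artefact, not the function's meaning).
def Pre_compute_height (n : Int) (parents : List Int) : Prop :=
  (n ≤ 0 ∨ n ≤ (parents.length : Int)) ∧
  (∀ i : Nat, i < n.toNat → (parents.getD i 0 = -1 ∨ (0 ≤ parents.getD i 0 ∧ parents.getD i 0 < n))) ∧
  (∀ i : Nat, i < n.toNat → iterParent parents n.toNat (i : Int) = -1)

instance (n : Int) (parents : List Int) : Decidable (Pre_compute_height n parents) := by
  unfold Pre_compute_height; infer_instance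

def pvWitness_compute_height : Int × List Int := (3, [-1, 0, 1])

def Spec_compute_height (n : Int) (parents : List Int) (out : Int) : Prop := out = compute_height_alt n parents
instance (n : Int) (parents : List Int) (out : Int) : Decidable (Spec_compute_height n parents out) := by unfold Spec_compute_height; infer_instance

-- ===== CLAIM (what is proved, stated in full; the proofs are below) =====
def Claim_equal_compute_height : Prop := ∀ (n : Int) (parents : List Int), Dom_compute_height n parents → Pre_compute_height n parents → Spec_compute_height n parents (compute_height n parents)

-- ===== LEMMAS AND PROOFS =====

-- depth of a node: 0 for -1, else 1 + depth of its parent, computed with fuel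
def dOf (parents : List Int) : Nat → Int → Nat
  | 0, _ => 0
  | f+1, j => if j = -1 then 0 else dOf parents f ((PySem.List.pyGet? parents j).getD (-1)) + 1

lemma dOf_neg_one (parents : List Int) (f : Nat) : dOf parents f (-1) = 0 := by
  cases f <;> simp [dOf]

lemma dOf_le (parents : List Int) : ∀ f j, dOf parents f j ≤ f := by
  intro f
  induction f with
  | zero => intro j; simp [dOf]
  | succ f ih =>
    intro j
    simp only [dOf]
    split
    · omega
    · have := ih ((PySem.List.pyGet? parents j).getD (-1)); omega

lemma iterParent_mono (parents : List Int) : ∀ f j, iterParent parents f j = -1 →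
    iterParent parents (f+1) j = -1 := by
  intro f
  induction f with
  | zero => intro j h; simp [iterParent] at h ⊢; simp [h]
  | succ f ih =>
    intro j h
    simp only [iterParent] at h ⊢
    split
    · rfl
    · rename_i hj
      rw [if_neg hj] at h
      exact ih _ h

lemma iterParent_le (parents : List Int) {f g : Nat} (h : f ≤ g) {j : Int}
    (hj : iterParent parents f j = -1) : iterParent parents g j = -1 := by
  induction g, h using Nat.le_induction with
  | base => exact hj
  | succ g _ ih => exact iterParent_mono parents g j ih

lemma dOf_stab (parents : List Int) : ∀ f j, iterParent parents f j = -1 →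
    ∀ g, f ≤ g → dOf parents g j = dOf parents f j := by
  intro f
  induction f with
  | zero =>
    intro j h g _
    simp only [iterParent] at h
    subst h
    simp [dOf_neg_one]
  | succ f ih =>
    intro j h g hg
    by_cases hj : j = -1
    · subst hj; simp [dOf_neg_one]
    · simp only [iterParent, if_neg hj] at h
      obtain ⟨g', rfl⟩ : ∃ g', g = g' + 1 := ⟨g - 1, by omega⟩
      simp only [dOf, if_neg hj]
      rw [ih _ h g' (by omega)]


-- reading a valid node's parent: it exists and is itself valid
lemma entry_spec (n : Int) (parents : List Int)
    (hnl : n ≤ (parents.length : Int))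
    (hgood : ∀ i : Nat, i < n.toNat → (parents.getD i 0 = -1 ∨ (0 ≤ parents.getD i 0 ∧ parents.getD i 0 < n)))
    {j : Int} (hj0 : 0 ≤ j) (hjn : j < n) :
    ∃ p, PySem.List.pyGet? parents j = some p ∧ (p = -1 ∨ (0 ≤ p ∧ p < n)) := by
  have hjl : j < (parents.length : Int) := lt_of_lt_of_le hjn hnl
  have hjt : j.toNat < parents.length := by omega
  refine ⟨parents[j.toNat], ?_, ?_⟩
  · exact PySem.List.pyGet?_eq_some_getElem parents hj0 hjl
  · have := hgood j.toNat (by omega)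
    rwa [List.getD_eq_getElem parents 0 hjt] at this

-- one step of the depth recurrence for a valid non-root node
lemma step_spec (n : Int) (parents : List Int)
    (hnl : n ≤ (parents.length : Int))
    (hgood : ∀ i : Nat, i < n.toNat → (parents.getD i 0 = -1 ∨ (0 ≤ parents.getD i 0 ∧ parents.getD i 0 < n)))
    (hacyc : ∀ i : Nat, i < n.toNat → iterParent parents n.toNat (i : Int) = -1)
    {j : Int} (hj0 : 0 ≤ j) (hjn : j < n) :
    ∃ p, PySem.List.pyGet? parents j = some p ∧ (p = -1 ∨ (0 ≤ p ∧ p < n)) ∧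
      iterParent parents n.toNat p = -1 ∧
      dOf parents n.toNat j = dOf parents n.toNat p + 1 := by
  obtain ⟨p, hget, hpgood⟩ := entry_spec n parents hnl hgood hj0 hjn
  have hjt : j.toNat < n.toNat := by omega
  have hiter := hacyc j.toNat hjt
  rw [show ((j.toNat : Nat) : Int) = j by omega] at hiter
  obtain ⟨m, hm⟩ : ∃ m, n.toNat = m + 1 := ⟨n.toNat - 1, by omega⟩
  have hjne : j ≠ -1 := by omega
  rw [hm] at hiter
  simp only [iterParent, if_neg hjne, hget, Option.getD_some] at hiter
  have hiterN : iterParent parents n.toNat p = -1 := iterParent_le parents (by omega) hiter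
  refine ⟨p, hget, hpgood, hiterN, ?_⟩
  have hd : dOf parents (m + 1) j = dOf parents m p + 1 := by
    simp only [dOf, if_neg hjne, hget, Option.getD_some]
  rw [hm, hd, dOf_stab parents m p hiter m (le_refl m)]
  rw [← dOf_stab parents m p hiter (m) (le_refl m)]
  have := dOf_stab parents m p hiter (m + 1) (by omega)
  omega

-- correctness of A's memoized helper: with enough fuel it returns the depth and keeps the memo valid
lemma pvH_spec (n : Int) (parents : List Int)
    (hnl : n ≤ (parents.length : Int))
    (hgood : ∀ i : Nat, i < n.toNat → (parents.getD i 0 = -1 ∨ (0 ≤ parents.getD i 0 ∧ parents.getD i 0 < n)))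
    (hacyc : ∀ i : Nat, i < n.toNat → iterParent parents n.toNat (i : Int) = -1) :
    ∀ (fuel : Nat) (j : Int) (q : List Int), q.length = n.toNat →
      (∀ k : Nat, (hk : k < q.length) → q[k] = -1 ∨ q[k] = (dOf parents n.toNat (k : Int) : Int)) →
      0 ≤ j → j < n → dOf parents n.toNat j ≤ fuel →
      ∃ q', pvH parents fuel j q = some ((dOf parents n.toNat j : Int), q') ∧ q'.length = n.toNat ∧
        (∀ k : Nat, (hk : k < q'.length) → q'[k] = -1 ∨ q'[k] = (dOf parents n.toNat (k : Int) : Int)) := by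
  intro fuel
  induction fuel with
  | zero =>
    intro j q _ _ hj0 hjn hfuel
    obtain ⟨p, _, _, _, hdj⟩ := step_spec n parents hnl hgood hacyc hj0 hjn
    omega
  | succ fuel ih =>
    intro j q hqlen hinv hj0 hjn hfuel
    obtain ⟨p, hget, hpgood, hpiter, hdj⟩ := step_spec n parents hnl hgood hacyc hj0 hjn
    have hjt : j.toNat < q.length := by omega
    have hjq : PySem.List.pyGet? q j = some q[j.toNat] :=
      PySem.List.pyGet?_eq_some_getElem q hj0 (by omega)
    have hjcast : ((j.toNat : Nat) : Int) = j := by omega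
    simp only [pvH, hjq]
    by_cases hv : q[j.toNat] = -1
    · rw [if_neg (by simp [hv])]
      simp only [hget]
      by_cases hp : p = -1
      · rw [if_pos hp]
        have h1 : PySem.List.pySet? q j 1 = some (q.set j.toNat 1) := by
          have := PySem.List.pySet?_natCast q j.toNat (1 : Int) (by omega)
          rwa [show ((j.toNat : Nat) : Int) = j by omega] at this
        simp only [h1]
        have hget1 : PySem.List.pyGet? (q.set j.toNat 1) j = some 1 := by
          have : (q.set j.toNat 1)[j.toNat]'(by simpa using hjt) = 1 := List.getElem_set_self _
          have h2 := PySem.List.pyGet?_eq_some_getElem (q.set j.toNat 1) hj0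
            (by simpa using (show j < (q.length : Int) by omega))
          rw [h2, this]
        simp only [hget1]
        have hd1 : dOf parents n.toNat j = 1 := by
          rw [hp, dOf_neg_one] at hdj; omega
        refine ⟨q.set j.toNat 1, by rw [hd1]; rfl, by simpa using hqlen, ?_⟩
        intro k hk
        simp only [List.length_set] at hk
        by_cases hkj : k = j.toNat
        · subst hkj
          right
          simp [List.getElem_set_self, hjcast, hd1]
        · rw [List.getElem_set_ne (by omega)]
          exact hinv k (by omega)
      · rw [if_neg hp]
        have hp0 : 0 ≤ p ∧ p < n := hpgood.resolve_left hp
        obtain ⟨q1, hrec, hq1len, hinv1⟩ := ih p q hqlen hinv hp0.1 hp0.2 (by omega)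
        simp only [hrec]
        have hset1 : PySem.List.pySet? q1 j ((dOf parents n.toNat p : Int) + 1)
            = some (q1.set j.toNat ((dOf parents n.toNat p : Int) + 1)) := by
          have := PySem.List.pySet?_natCast q1 j.toNat ((dOf parents n.toNat p : Int) + 1) (by omega)
          rwa [show ((j.toNat : Nat) : Int) = j by omega] at this
        simp only [hset1]
        set w : Int := (dOf parents n.toNat p : Int) + 1 with hw
        have hgetw : PySem.List.pyGet? (q1.set j.toNat w) j = some w := by
          have hlt : j.toNat < q1.length := by omega
          have : (q1.set j.toNat w)[j.toNat]'(by simpa using hlt) = w := List.getElem_set_self _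
          have h2 := PySem.List.pyGet?_eq_some_getElem (q1.set j.toNat w) hj0
            (by simpa using (show j < (q1.length : Int) by omega))
          rw [h2, this]
        simp only [hgetw]
        have hdw : (dOf parents n.toNat j : Int) = w := by rw [hw]; push_cast [hdj]; ring
        refine ⟨q1.set j.toNat w, by rw [hdw], by simpa using hq1len, ?_⟩
        intro k hk
        simp only [List.length_set] at hk
        by_cases hkj : k = j.toNat
        · subst hkj
          right
          simp only [List.getElem_set_self, hjcast]
          omega
        · rw [List.getElem_set_ne (by omega)]
          exact hinv1 k (by omega)
    · rw [if_pos (by simp [hv])]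
      rcases hinv j.toNat hjt with h | h
      · exact absurd h hv
      · rw [hjcast] at h
        exact ⟨q, by rw [← h], hqlen, hinv⟩

-- correctness of B's chasing loop: with enough fuel it returns depth + accumulator
lemma pvChase_spec (n : Int) (parents : List Int)
    (hnl : n ≤ (parents.length : Int))
    (hgood : ∀ i : Nat, i < n.toNat → (parents.getD i 0 = -1 ∨ (0 ≤ parents.getD i 0 ∧ parents.getD i 0 < n))) :
    ∀ (k fuel : Nat) (j d : Int), (j = -1 ∨ (0 ≤ j ∧ j < n)) →
      iterParent parents k j = -1 → k < fuel →
      pvChase parents fuel j d = some (d + (dOf parents k j : Int)) := by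
  intro k
  induction k with
  | zero =>
    intro fuel j d _ hiter hf
    simp only [iterParent] at hiter
    subst hiter
    obtain ⟨f, rfl⟩ : ∃ f, fuel = f + 1 := ⟨fuel - 1, by omega⟩
    simp [pvChase, dOf]
  | succ k ih =>
    intro fuel j d hjgood hiter hf
    obtain ⟨f, rfl⟩ : ∃ f, fuel = f + 1 := ⟨fuel - 1, by omega⟩
    by_cases hj : j = -1
    · subst hj
      simp [pvChase, dOf_neg_one]
    · have hj0 : 0 ≤ j ∧ j < n := hjgood.resolve_left hj
      obtain ⟨p, hget, hpgood⟩ := entry_spec n parents hnl hgood hj0.1 hj0.2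
      simp only [iterParent, if_neg hj, hget, Option.getD_some] at hiter
      simp only [pvChase, if_neg hj, hget]
      rw [ih f p (d + 1) hpgood hiter (by omega)]
      simp only [dOf, if_neg hj, hget, Option.getD_some]
      push_cast
      ring_nf

-- the two folds agree, threading A's memo array through as an existential
lemma fold_eq (n : Int) (parents : List Int)
    (hnl : n ≤ (parents.length : Int))
    (hgood : ∀ i : Nat, i < n.toNat → (parents.getD i 0 = -1 ∨ (0 ≤ parents.getD i 0 ∧ parents.getD i 0 < n)))
    (hacyc : ∀ i : Nat, i < n.toNat → iterParent parents n.toNat (i : Int) = -1) :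
    ∀ (l : List Int), (∀ x ∈ l, 0 ≤ x ∧ x < n) → ∀ (M : Int) (q : List Int),
      q.length = n.toNat →
      (∀ k : Nat, (hk : k < q.length) → q[k] = -1 ∨ q[k] = (dOf parents n.toNat (k : Int) : Int)) →
      ∃ q', (l.foldl
          (fun st root =>
            match st with
            | none => none
            | some (mh, q) =>
              match pvH parents (q.length + 1) root q with
              | none => none
              | some (v, q') => some (max mh v, q'))
          (some (M, q)))
        = some (l.foldl
            (fun best start =>
              match pvChase parents (parents.length + 1) start 0 with
              | none => best
              | some d => if best < d then d else best)
            M, q') := by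
  intro l
  induction l with
  | nil => intro _ M q _ _; exact ⟨q, rfl⟩
  | cons x l ihl =>
    intro hmem M q hqlen hinv
    have hx := hmem x (List.mem_cons_self)
    have hdle : dOf parents n.toNat x ≤ n.toNat := dOf_le parents n.toNat x
    obtain ⟨q1, hH, hq1len, hinv1⟩ := pvH_spec n parents hnl hgood hacyc (q.length + 1) x q
      hqlen hinv hx.1 hx.2 (by omega)
    have hiterx : iterParent parents n.toNat x = -1 := by
      have := hacyc x.toNat (by omega)
      rwa [show ((x.toNat : Nat) : Int) = x by omega] at this
    have hC := pvChase_spec n parents hnl hgood n.toNat (parents.length + 1) x 0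
      (Or.inr hx) hiterx (by omega)
    have hmax : (if M < (0 + (dOf parents n.toNat x : Int)) then (0 + (dOf parents n.toNat x : Int)) else M)
        = max M (dOf parents n.toNat x : Int) := by omega
    simp only [List.foldl_cons, hH, hC, hmax]
    exact ihl (fun y hy => hmem y (List.mem_cons_of_mem x hy)) (max M (dOf parents n.toNat x : Int)) q1 hq1len hinv1

theorem compute_height_spec : Claim_equal_compute_height := by
  intro n parents _ hPre
  obtain ⟨hlen, hgood, hacyc⟩ := hPre
  unfold Spec_compute_height compute_height compute_height_alt
  by_cases hn0 : n ≤ 0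
  · rw [PySem.List.pyRange_one_eq_nil hn0]
    rfl
  have hnl : n ≤ (parents.length : Int) := hlen.resolve_left hn0
  have hrep : (List.replicate n.toNat (-1 : Int)).length = n.toNat := List.length_replicate
  obtain ⟨q', hq'⟩ := fold_eq n parents hnl hgood hacyc (PySem.List.pyRange 0 n 1)
    (fun x hx => by
      rw [PySem.List.mem_pyRange_one] at hx
      exact hx)
    0 (List.replicate n.toNat (-1 : Int)) hrep
    (fun k hk => Or.inl (List.getElem_replicate _))
  simp only [hq']
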